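-- pv_equiv track=rewrite | github.com/arsenetar/dupeguru | hscommon/util.py | trailiter
-- ===== SOURCE A (Python) =====
-- def trailiter(iterable, skipfirst=False):
--     """Yields (prev_element, element), starting with (None, first_element).
--
--     If skipfirst is True, there will be no (None, item1) element and we'll start
--     directly with (item1, item2).
--     """
--     it = iter(iterable)
--     if skipfirst:
--         prev = next(it)
--     else:
--         prev = None
--     for item in it:
--         yield prev, item
--         prev = item
-- ===== SOURCE B (Python) =====
-- def trailiter(iterable, skipfirst=False):
--     """Yields (prev_element, element), starting with (None, first_element).
--
--     If skipfirst is True, there will be no (None, item1) element and we'll start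
--     directly with (item1, item2).
--     """
--     items = list(iterable)
--     if skipfirst:
--         yield from zip(items, items[1:])
--     else:
--         yield from zip([None] + items, items)
-- ===== Notes on version B (the rewrite author's own statement) =====
-- stated objective: idiomatic
-- what changed: Replaces A's explicit prev-carrying for-loop with the pairwise zip idiom: materialise the items and 'yield from' a zip of the None-prefixed (or tail-shifted, for skipfirst) list against itself.
-- crash fix: On an empty iterable with skipfirst=True, A raises RuntimeError (StopIteration from next(it) inside the generator) while B yields nothing and returns []. — e.g. on trailiter([], true): A raises RuntimeError, B returns []
import Mathlib
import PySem

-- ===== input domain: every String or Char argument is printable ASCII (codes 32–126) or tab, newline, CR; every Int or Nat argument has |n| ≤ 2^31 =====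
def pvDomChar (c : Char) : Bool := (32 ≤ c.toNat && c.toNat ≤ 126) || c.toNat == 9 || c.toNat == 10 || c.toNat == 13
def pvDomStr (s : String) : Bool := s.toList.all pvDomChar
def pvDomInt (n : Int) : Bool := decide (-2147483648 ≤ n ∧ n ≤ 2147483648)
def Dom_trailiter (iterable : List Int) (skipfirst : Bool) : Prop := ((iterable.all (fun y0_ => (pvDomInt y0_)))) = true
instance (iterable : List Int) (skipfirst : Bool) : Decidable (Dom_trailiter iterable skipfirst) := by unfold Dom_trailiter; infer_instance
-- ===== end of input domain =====

-- B replaces A's explicit prev-carrying loop with a zip of the None-prefixed (resp. shifted)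
-- list against itself (idiomatic pairwise); equivalence is about the RETURN value (the yielded
-- sequence, materialised as a list).

-- ===== PORT A =====
-- the 'for item in it' loop, carrying prev
def trailiterLoop (prev : Option Int) : List Int → List (Option Int × Int)
  | [] => []
  | item :: rest => (prev, item) :: trailiterLoop (some item) rest

def trailiter (iterable : List Int) (skipfirst : Bool) : List (Option Int × Int) :=
  if skipfirst then
    -- prev = next(it): raises StopIteration (→ RuntimeError) on empty input; excluded by Pre_
    match iterable with
    | [] => []
    | x :: rest => trailiterLoop (some x) rest
  else
    trailiterLoop none iterable

-- ===== PORT B =====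
def trailiter_alt (iterable : List Int) (skipfirst : Bool) : List (Option Int × Int) :=
  if skipfirst then
    List.zip (iterable.map some) (PySem.List.slice iterable (some 1) none)
  else
    List.zip (none :: iterable.map some) iterable

-- ===== PRECONDITION & SPEC =====
-- Pre_ excludes only empty iterable with skipfirst=True, where A's 'prev = next(it)' raises
-- StopIteration (surfacing as RuntimeError from the generator).
def Pre_trailiter (iterable : List Int) (skipfirst : Bool) : Prop :=
  skipfirst = true → iterable ≠ []
instance (iterable : List Int) (skipfirst : Bool) : Decidable (Pre_trailiter iterable skipfirst) := by
  unfold Pre_trailiter; infer_instance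
def pvWitness_trailiter : List Int × Bool := ([1, 2, 3], true)

-- On empty input with skipfirst=True, A raises RuntimeError while B yields nothing ([]).
def Raises_trailiter (iterable : List Int) (skipfirst : Bool) : Prop :=
  iterable = [] ∧ skipfirst = true
instance (iterable : List Int) (skipfirst : Bool) : Decidable (Raises_trailiter iterable skipfirst) := by
  unfold Raises_trailiter; infer_instance
def pvRaiseWitness_trailiter : List Int × Bool := ([], true)
def pvRaiseWitnessOut_trailiter : List (Option Int × Int) := []

def Spec_trailiter (iterable : List Int) (skipfirst : Bool) (out : List (Option Int × Int)) : Prop := out = trailiter_alt iterable skipfirst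
instance (iterable : List Int) (skipfirst : Bool) (out : List (Option Int × Int)) : Decidable (Spec_trailiter iterable skipfirst out) := by unfold Spec_trailiter; infer_instance

-- ===== CLAIM (what is proved, stated in full; the proofs are below) =====
def Claim_equal_trailiter : Prop := ∀ (iterable : List Int) (skipfirst : Bool), Dom_trailiter iterable skipfirst → Pre_trailiter iterable skipfirst → Spec_trailiter iterable skipfirst (trailiter iterable skipfirst)
def Claim_raises_trailiter : Prop := (∀ (iterable : List Int) (skipfirst : Bool), Dom_trailiter iterable skipfirst → Raises_trailiter iterable skipfirst → ¬ Pre_trailiter iterable skipfirst) ∧ (Dom_trailiter (pvRaiseWitness_trailiter.1) (pvRaiseWitness_trailiter.2) ∧ Raises_trailiter (pvRaiseWitness_trailiter.1) (pvRaiseWitness_trailiter.2) ∧ trailiter_alt (pvRaiseWitness_trailiter.1) (pvRaiseWitness_trailiter.2) = pvRaiseWitnessOut_trailiter)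

-- ===== LEMMAS AND PROOFS =====
theorem trailiterLoop_eq_zip (prev : Option Int) (xs : List Int) :
    trailiterLoop prev xs = List.zip (prev :: xs.map some) xs := by
  induction xs generalizing prev with
  | nil => rfl
  | cons x rest ih => simp [trailiterLoop, ih]

-- ===== VERDICT (by name: the statement is the Claim_ definition above) =====
theorem trailiter_spec : Claim_equal_trailiter := by
  intro iterable skipfirst _ hpre
  unfold Spec_trailiter trailiter trailiter_alt
  cases skipfirst with
  | false => simp [trailiterLoop_eq_zip]
  | true =>
    cases iterable with
    | nil => exact absurd rfl (hpre rfl)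
    | cons x rest =>
      simp [trailiterLoop_eq_zip, PySem.List.slice_from_one, List.zip]

theorem trailiter_raises : Claim_raises_trailiter := by
  unfold Claim_raises_trailiter
  refine ⟨?_, by decide⟩
  rintro iterable skipfirst _ ⟨hnil, hsk⟩ hpre
  exact hpre hsk hnil

-- self-check: B's port really returns the stated literal at the raise witness
theorem pvRaiseWitness_ok :
    trailiter_alt (pvRaiseWitness_trailiter.1) (pvRaiseWitness_trailiter.2) = pvRaiseWitnessOut_trailiter :=
  trailiter_raises.2.2.2
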